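-- pv_equiv track=rewrite | github.com/klaapbakken/advent-of-code-2019 | 4/sol4.py | n_matching
-- ===== SOURCE A (Python) =====
-- def n_matching(n, number):
--     matching = []
--     i = 0
--     positions = tuple(range(i, n+i))
--     while positions[-1] < len(number):
--         subsequence = list(map(number.__getitem__, positions))
--         for digit in range(10):
--             if all(map(lambda x: x == str(digit), subsequence)):
--                 matching.append(positions)
--         i += 1
--         positions = tuple(range(i, n+i))
--     return matching
-- ===== SOURCE B (Python) =====
-- def n_matching(n, number):
--     matching = []
--     run = 0
--     prev = None
--     for j, c in enumerate(number):
--         run = run + 1 if c == prev else 1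
--         prev = c
--         if run >= n and c.isdigit():
--             matching.append(tuple(range(j - n + 1, j + 1)))
--     return matching
-- ===== Notes on version B (the rewrite author's own statement) =====
-- stated objective: faster
-- what changed: Replaced the window-by-window scan (each window rebuilt and compared against all 10 digit strings) by a single left-to-right pass that tracks the length of the current run of equal characters and emits a window whenever the run reaches n at a digit character.
import Mathlib
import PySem

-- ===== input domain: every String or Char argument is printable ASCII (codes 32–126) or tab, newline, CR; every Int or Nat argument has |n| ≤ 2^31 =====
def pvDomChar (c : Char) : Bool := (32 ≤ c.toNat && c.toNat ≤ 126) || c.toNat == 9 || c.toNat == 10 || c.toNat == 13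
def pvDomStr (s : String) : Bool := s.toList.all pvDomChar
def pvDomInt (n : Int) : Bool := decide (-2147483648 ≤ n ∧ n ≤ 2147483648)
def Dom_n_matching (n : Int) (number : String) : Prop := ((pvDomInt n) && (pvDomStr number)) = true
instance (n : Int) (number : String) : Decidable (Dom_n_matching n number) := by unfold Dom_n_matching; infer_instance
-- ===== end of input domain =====

-- B replaces A's window-by-window rescan (each window compared against all 10 digit strings) by a
-- single pass tracking the length of the current run of equal characters (objective: faster).

-- ===== PORT A =====
-- inner loop: 'for digit in range(10): if all(map(lambda x: x == str(digit), subsequence)): matching.append(positions)'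
def nmA_inner (positions : List Int) (subsequence : List Char) (acc : List (List Int)) : List (List Int) :=
  (PySem.List.pyRange 0 10 1).foldl (fun m d =>
    if subsequence.all (fun x => String.ofList [x] == PySem.Int.toStr d) then m ++ [positions] else m) acc

-- the while loop; the 'none' branch is Python's IndexError at positions[-1] (excluded by Pre_)
def nmA_loop (n : Int) (s : List Char) (i : Int) (acc : List (List Int)) : List (List Int) :=
  let positions := PySem.List.pyRange i (n + i) 1
  match h : PySem.List.pyGet? positions (-1) with
  | none => acc
  | some last =>
    if last < (s.length : Int) then
      nmA_loop n s (i + 1) (nmA_inner positions (positions.map (fun p => PySem.List.pyGetD s p ' ')) acc)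
    else acc
termination_by ((s.length : Int) - i).toNat
decreasing_by
  have hm := PySem.List.mem_of_pyGet?_eq_some _ h
  rw [PySem.List.mem_pyRange_one] at hm
  omega

def n_matching (n : Int) (number : String) : List (List Int) :=
  nmA_loop n number.toList 0 []

-- ===== PORT B =====
-- 'for j, c in enumerate(number): run = run+1 if c == prev else 1; prev = c; if run >= n and c.isdigit(): append'
def nmB_loop (n : Int) (j run : Int) (prev : Option Char) (acc : List (List Int)) : List Char → List (List Int)
  | [] => acc
  | c :: rest =>
    let run' := if some c == prev then run + 1 else 1
    let acc' := if run' ≥ n ∧ PySem.Chars.isdigit c then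
        acc ++ [PySem.List.pyRange (j - n + 1) (j + 1) 1] else acc
    nmB_loop n (j + 1) run' (some c) acc' rest

def n_matching_alt (n : Int) (number : String) : List (List Int) :=
  nmB_loop n 0 0 none [] number.toList

-- ===== PRECONDITION & SPEC =====
-- For n ≤ 0 the tuple 'positions' is empty and A raises IndexError at positions[-1]; Pre_ excludes exactly those inputs.
def Pre_n_matching (n : Int) (number : String) : Prop := 1 ≤ n
instance (n : Int) (number : String) : Decidable (Pre_n_matching n number) := by unfold Pre_n_matching; infer_instance
def pvWitness_n_matching : Int × String := (2, "1223")
def Spec_n_matching (n : Int) (number : String) (out : List (List Int)) : Prop := out = n_matching_alt n number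
instance (n : Int) (number : String) (out : List (List Int)) : Decidable (Spec_n_matching n number out) := by unfold Spec_n_matching; infer_instance

-- ===== CLAIM (what is proved, stated in full; the proofs are below) =====
def Claim_equal_n_matching : Prop := ∀ (n : Int) (number : String), Dom_n_matching n number → Pre_n_matching n number → Spec_n_matching n number (n_matching n number)

-- ===== LEMMAS AND PROOFS =====
def digCh (d : Nat) : Char := Char.ofNat (48 + d)

lemma ofList_one_inj (x c : Char) : String.ofList [x] = String.ofList [c] ↔ x = c := by
  constructor
  · intro h
    have := congrArg String.toList h
    simpa using this
  · intro h; rw [h]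

lemma isdigit_iff (c : Char) : PySem.Chars.isdigit c = true ↔ 48 ≤ c.toNat ∧ c.toNat ≤ 57 := by
  unfold PySem.Chars.isdigit
  rw [Bool.and_eq_true, decide_eq_true_iff, decide_eq_true_iff, Char.le_def, Char.le_def,
    UInt32.le_iff_toNat_le, UInt32.le_iff_toNat_le]
  show 48 ≤ c.val.toNat ∧ c.val.toNat ≤ 57 ↔ _
  rfl

lemma isdigit_digCh (d : Nat) (hd : d < 10) : PySem.Chars.isdigit (digCh d) = true := by
  interval_cases d <;> decide

lemma digCh_toNat (d : Nat) (hd : d < 10) : (digCh d).toNat = 48 + d := by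
  interval_cases d <;> decide

lemma digCh_ofdigit (c : Char) (h1 : 48 ≤ c.toNat) (h2 : c.toNat ≤ 57) :
    digCh (c.toNat - 48) = c := by
  unfold digCh
  rw [show 48 + (c.toNat - 48) = c.toNat by omega]
  exact Char.ofNat_toNat c

lemma toStr_digit (d : Int) (h0 : 0 ≤ d) (h1 : d < 10) :
    PySem.Int.toStr d = String.ofList [digCh d.toNat] := by
  interval_cases d <;> decide

lemma all_eq_iff (s : List Char) (N i : Nat) (d : Int) (h0 : 0 ≤ d) (h1 : d < 10) :
    (((List.range N).map (fun k => s.getD (i + k) ' ')).all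
        (fun x => String.ofList [x] == PySem.Int.toStr d) = true)
      ↔ ∀ k < N, s.getD (i + k) ' ' = digCh d.toNat := by
  rw [List.all_map]
  simp only [List.all_eq_true, List.mem_range, Function.comp, beq_iff_eq,
    toStr_digit d h0 h1, ofList_one_inj]

def good (s : List Char) (N e : Nat) : Bool :=
  decide (N ≤ e + 1) && decide (∀ k < N, s.getD (e - k) ' ' = s.getD e ' ') && PySem.Chars.isdigit (s.getD e ' ')

lemma good_iff (s : List Char) (N e : Nat) : good s N e = true ↔
    (N ≤ e + 1 ∧ (∀ k < N, s.getD (e - k) ' ' = s.getD e ' ') ∧ PySem.Chars.isdigit (s.getD e ' ') = true) := by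
  simp [good, and_assoc]

def win (N e : Nat) : List Int := PySem.List.pyRange ((e : Int) + 1 - N) ((e : Int) + 1) 1

def refFrom (s : List Char) (N j : Nat) : List (List Int) :=
  (List.range' j (s.length - j)).filterMap (fun e => if good s N e then some (win N e) else none)

lemma refFrom_stop (s : List Char) (N j : Nat) (h : s.length ≤ j) : refFrom s N j = [] := by
  unfold refFrom
  rw [Nat.sub_eq_zero_of_le h]
  rfl

lemma refFrom_step (s : List Char) (N j : Nat) (h : j < s.length) :
    refFrom s N j = (if good s N j then [win N j] else []) ++ refFrom s N (j + 1) := by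
  unfold refFrom
  rw [show s.length - j = (s.length - (j+1)) + 1 by omega, List.range'_succ, List.filterMap_cons]
  split_ifs <;> simp

lemma filter_unique_map_const {l : List Int} {p : Int → Bool} {d0 : Int} (pos : List Int)
    (h0 : d0 ∈ l) (h1 : p d0 = true) (hu : ∀ d ∈ l, p d = true → d = d0) (hnd : l.Nodup) :
    (l.filter p).map (fun _ => pos) = [pos] := by
  induction l with
  | nil => cases h0
  | cons a t ih =>
    rcases List.nodup_cons.mp hnd with ⟨hna, hndt⟩
    by_cases hpa : p a = true
    · have ha : a = d0 := hu a List.mem_cons_self hpa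
      subst ha
      have ht : t.filter p = [] := by
        rw [List.filter_eq_nil_iff]
        intro d hd hpd
        exact hna ((hu d (List.mem_cons_of_mem _ hd) hpd) ▸ hd)
      rw [List.filter_cons_of_pos hpa, ht]
      rfl
    · have ha : a ≠ d0 := fun he => hpa (he ▸ h1)
      have h0' : d0 ∈ t := by
        rcases List.mem_cons.mp h0 with h | h
        · exact absurd h.symm ha
        · exact h
      rw [List.filter_cons_of_neg (by simp [hpa])]
      exact ih h0' (fun d hd => hu d (List.mem_cons_of_mem _ hd)) hndt

lemma inner_eq (s : List Char) (N i : Nat) (hN : 1 ≤ N) (acc : List (List Int)) (pos : List Int) :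
    nmA_inner pos ((List.range N).map fun k => s.getD (i + k) ' ') acc
      = acc ++ (if good s N (i + N - 1) then [pos] else []) := by
  unfold nmA_inner
  rw [PySem.List.foldl_append_if
    (fun d => ((List.range N).map fun k => s.getD (i + k) ' ').all
      (fun x => String.ofList [x] == PySem.Int.toStr d)) (fun _ => pos)]
  congr 1
  by_cases hg : good s N (i + N - 1) = true
  · obtain ⟨hle, hall, hdig⟩ := (good_iff s N (i + N - 1)).mp hg
    obtain ⟨h48, h57⟩ := (isdigit_iff _).mp hdig
    set c := s.getD (i + N - 1) ' ' with hc
    set d0 : Int := (c.toNat : Int) - 48 with hd0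
    have hd0n : d0.toNat = c.toNat - 48 := by omega
    have hwin : ∀ k < N, s.getD (i + k) ' ' = c := by
      intro k hk
      have h1 : i + N - 1 - (N - 1 - k) = i + k := by omega
      have h2 := hall (N - 1 - k) (by omega)
      rw [h1] at h2
      exact h2
    have hp0 : (((List.range N).map fun k => s.getD (i + k) ' ').all
        (fun x => String.ofList [x] == PySem.Int.toStr d0)) = true := by
      rw [all_eq_iff s N i d0 (by omega) (by omega)]
      intro k hk
      rw [hwin k hk, hd0n, digCh_ofdigit c h48 h57]
    have hu : ∀ d ∈ PySem.List.pyRange 0 10 1,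
        (((List.range N).map fun k => s.getD (i + k) ' ').all
          (fun x => String.ofList [x] == PySem.Int.toStr d)) = true → d = d0 := by
      intro d hd hp
      rw [PySem.List.mem_pyRange_one] at hd
      rw [all_eq_iff s N i d hd.1 hd.2] at hp
      have h1 := hp 0 (by omega)
      have h2 := hwin 0 (by omega)
      have h3 : digCh d.toNat = c := by rw [← h1, h2]
      have h4 := congrArg Char.toNat h3
      rw [digCh_toNat d.toNat (by omega)] at h4
      omega
    rw [if_pos hg]
    exact filter_unique_map_const pos
      (by rw [PySem.List.mem_pyRange_one]; omega) hp0 hu (PySem.List.nodup_pyRange_one 0 10)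
  · rw [if_neg hg]
    have hnil : (PySem.List.pyRange 0 10 1).filter
        (fun d => ((List.range N).map fun k => s.getD (i + k) ' ').all
          (fun x => String.ofList [x] == PySem.Int.toStr d)) = [] := by
      rw [List.filter_eq_nil_iff]
      intro d hd hp
      apply hg
      rw [good_iff]
      rw [PySem.List.mem_pyRange_one] at hd
      rw [all_eq_iff s N i d hd.1 hd.2] at hp
      have he : s.getD (i + N - 1) ' ' = digCh d.toNat := by
        have := hp (N - 1) (by omega)
        rw [show i + (N - 1) = i + N - 1 by omega] at this
        exact this
      refine ⟨by omega, ?_, ?_⟩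
      · intro k hk
        have h1 : i + N - 1 - k = i + (N - 1 - k) := by omega
        rw [h1, hp (N - 1 - k) (by omega), he]
      · rw [he]
        exact isdigit_digCh d.toNat (by omega)
    rw [hnil]
    rfl

lemma sub_eq (s : List Char) (n : Int) (N : Nat) (hn : n = (N : Int)) (i : Nat) :
    (PySem.List.pyRange (i : Int) (n + i) 1).map (fun p => PySem.List.pyGetD s p ' ')
      = (List.range N).map fun k => s.getD (i + k) ' ' := by
  rw [PySem.List.pyRange_one, show ((n + i - i).toNat) = N by omega, List.map_map]
  apply List.map_congr_left
  intro k _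
  show PySem.List.pyGetD s ((i : Int) + k) ' ' = _
  rw [show ((i : Int) + k) = ((i + k : Nat) : Int) by push_cast; ring, PySem.List.pyGetD_natCast]

lemma pos_eq (n : Int) (N : Nat) (hn : n = (N : Int)) (hN : 1 ≤ N) (i : Nat) :
    PySem.List.pyRange (i : Int) (n + i) 1 = win N (i + N - 1) := by
  unfold win
  have h1 : ((i + N - 1 : Nat) : Int) + 1 - N = (i : Int) := by omega
  have h2 : ((i + N - 1 : Nat) : Int) + 1 = n + i := by omega
  rw [h1, h2]

lemma nmA_loop_unfold (n : Int) (s : List Char) (i : Int) (acc : List (List Int)) (hn : 1 ≤ n) :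
    nmA_loop n s i acc =
      if n + i - 1 < (s.length : Int) then
        nmA_loop n s (i + 1) (nmA_inner (PySem.List.pyRange i (n + i) 1)
          ((PySem.List.pyRange i (n + i) 1).map (fun p => PySem.List.pyGetD s p ' ')) acc)
      else acc := by
  have hsplit : PySem.List.pyRange i (n + i) 1 = PySem.List.pyRange i (n + i - 1) 1 ++ [n + i - 1] := by
    have h := PySem.List.pyRange_one_succ_right (a := i) (b := n + i - 1) (by omega)
    rw [show n + i - 1 + 1 = n + i by ring] at h
    exact h
  have hget : PySem.List.pyGet? (PySem.List.pyRange i (n + i) 1) (-1) = some (n + i - 1) := by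
    rw [hsplit]; exact PySem.List.pyGet?_neg_one_append_singleton _ _
  rw [nmA_loop]
  split
  · rename_i heq
    rw [hget] at heq; cases heq
  · rename_i last heq
    rw [hget] at heq
    cases heq
    rfl

lemma A_loop_eq (n : Int) (N : Nat) (hn : n = (N : Int)) (hN : 1 ≤ N) (s : List Char) :
    ∀ (m i : Nat) (acc : List (List Int)), s.length - i ≤ m →
      nmA_loop n s (i : Int) acc = acc ++ refFrom s N (i + N - 1) := by
  intro m
  induction m with
  | zero =>
    intro i acc h
    rw [nmA_loop_unfold _ _ _ _ (by omega), if_neg (by omega : ¬ (n + (i : Int) - 1 < (s.length : Int))),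
      refFrom_stop s N _ (by omega)]
    simp
  | succ m ih =>
    intro i acc h
    rw [nmA_loop_unfold _ _ _ _ (by omega)]
    by_cases hlt : n + (i : Int) - 1 < (s.length : Int)
    · rw [if_pos hlt, sub_eq s n N hn i, pos_eq n N hn hN i, inner_eq s N i hN acc _,
        show ((i : Int) + 1) = ((i + 1 : Nat) : Int) by push_cast; ring,
        ih (i + 1) _ (by omega),
        show (i + 1) + N - 1 = (i + N - 1) + 1 by omega,
        refFrom_step s N (i + N - 1) (by omega), List.append_assoc]
    · rw [if_neg hlt, refFrom_stop s N _ (by omega)]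
      simp

def Rinv (s : List Char) (j run : Nat) : Prop :=
  run ≤ j ∧ (∀ k < run, s.getD (j - 1 - k) ' ' = s.getD (j - 1) ' ') ∧
    (run = j ∨ s.getD (j - 1 - run) ' ' ≠ s.getD (j - 1) ' ')

lemma B_loop_eq (n : Int) (N : Nat) (hn : n = (N : Int)) (hN : 1 ≤ N) (s : List Char) :
    ∀ (rest : List Char) (j run : Nat) (acc : List (List Int)),
      rest = s.drop j → Rinv s j run →
      nmB_loop n (j : Int) (run : Int) (if j = 0 then none else some (s.getD (j - 1) ' ')) acc rest
        = acc ++ refFrom s N j := by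
  intro rest
  induction rest with
  | nil =>
    intro j run acc hrest _
    have hL : s.length ≤ j := by
      by_contra hlt
      have := congrArg List.length hrest
      simp [List.length_drop] at this
      omega
    rw [refFrom_stop s N j hL]
    simp [nmB_loop]
  | cons c rest' ih =>
    intro j run acc hrest hInv
    have hjL : j < s.length := by
      by_contra hge
      rw [List.drop_eq_nil_of_le (by omega)] at hrest
      cases hrest
    have hdrop : s.drop j = s[j] :: s.drop (j + 1) := List.drop_eq_getElem_cons hjL
    rw [hdrop] at hrest
    obtain ⟨hc, hrest'⟩ : c = s[j] ∧ rest' = s.drop (j + 1) := by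
      cases hrest; exact ⟨rfl, rfl⟩
    have hcj : s.getD j ' ' = c := by rw [List.getD_eq_getElem s ' ' hjL, hc]
    obtain ⟨hr1, hr2, hr3⟩ := hInv
    set nrun : Nat := if j ≠ 0 ∧ c = s.getD (j - 1) ' ' then run + 1 else 1 with hnrun
    have hrun' : (if some c == (if j = 0 then none else some (s.getD (j - 1) ' '))
        then (run : Int) + 1 else 1) = (nrun : Int) := by
      by_cases hj0 : j = 0
      · simp [hj0, hnrun]
      · by_cases hcp : c = s.getD (j - 1) ' '
        · simp [hj0, hcp, hnrun]
        · simp [hj0, hcp, hnrun]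
    have hInv' : Rinv s (j + 1) nrun := by
      by_cases hcase : j ≠ 0 ∧ c = s.getD (j - 1) ' '
      · rw [hnrun, if_pos hcase]
        refine ⟨by omega, ?_, ?_⟩
        · intro k hk
          rw [show j + 1 - 1 = j by omega]
          match k with
          | 0 => simp
          | (k' + 1) =>
            rw [show j - (k' + 1) = j - 1 - k' by omega, hr2 k' (by omega), ← hcase.2, hcj]
        · by_cases hrj : run = j
          · exact Or.inl (by omega)
          · refine Or.inr ?_
            rcases hr3 with h | h
            · exact absurd h hrj
            · rw [show j + 1 - 1 - (run + 1) = j - 1 - run by omega, show j + 1 - 1 = j by omega,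
                hcj, hcase.2]
              exact h
      · rw [hnrun, if_neg hcase]
        refine ⟨by omega, ?_, ?_⟩
        · intro k hk
          match k with
          | 0 => simp
        · by_cases hj0 : j = 0
          · exact Or.inl (by omega)
          · refine Or.inr ?_
            rw [show j + 1 - 1 - 1 = j - 1 by omega, show j + 1 - 1 = j by omega, hcj]
            intro he
            exact hcase ⟨hj0, he.symm⟩
    have hemit : ((nrun : Int) ≥ n ∧ PySem.Chars.isdigit c = true) ↔ good s N j = true := by
      obtain ⟨hq1, hq2, hq3⟩ := hInv'
      rw [good_iff]
      constructor
      · rintro ⟨hge, hdig⟩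
        refine ⟨by omega, ?_, by rw [hcj]; exact hdig⟩
        intro k hk
        have := hq2 k (by omega)
        rwa [show j + 1 - 1 = j by omega] at this
      · rintro ⟨hle, hall, hdig⟩
        refine ⟨?_, by rw [← hcj]; exact hdig⟩
        by_contra hlt
        have hsm : nrun < N := by omega
        rcases hq3 with h | h
        · omega
        · apply h
          rw [show j + 1 - 1 - nrun = j - nrun by omega, show j + 1 - 1 = j by omega]
          exact hall nrun hsm
    have hwin : PySem.List.pyRange ((j : Int) - n + 1) ((j : Int) + 1) 1 = win N j := by
      unfold win
      rw [show (j : Int) - n + 1 = (j : Int) + 1 - N by omega]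
    simp only [nmB_loop, hrun']
    by_cases hg : good s N j = true
    · rw [if_pos (hemit.mpr hg), hwin]
      have hjj : ((j : Int) + 1) = ((j + 1 : Nat) : Int) := by push_cast; ring
      rw [hjj]
      have := ih (j + 1) nrun (acc ++ [win N j]) hrest' hInv'
      rw [if_neg (by omega), show j + 1 - 1 = j by omega, hcj] at this
      rw [this, refFrom_step s N j hjL, if_pos hg, List.append_assoc]
    · rw [if_neg (fun hco => hg (hemit.mp hco))]
      have hjj : ((j : Int) + 1) = ((j + 1 : Nat) : Int) := by push_cast; ring
      rw [hjj]
      have := ih (j + 1) nrun acc hrest' hInv'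
      rw [if_neg (by omega), show j + 1 - 1 = j by omega, hcj] at this
      rw [this, refFrom_step s N j hjL, if_neg hg]
      simp

lemma refFrom_low (s : List Char) (N : Nat) :
    ∀ (d j : Nat), j + d = N - 1 → refFrom s N j = refFrom s N (N - 1) := by
  intro d
  induction d with
  | zero => intro j h; rw [show j = N - 1 by omega]
  | succ d ih =>
    intro j h
    by_cases hj : j < s.length
    · rw [refFrom_step s N j hj, if_neg (fun hg => by obtain ⟨h1, _, _⟩ := (good_iff s N j).mp hg; omega),
        List.nil_append]
      exact ih (j + 1) (by omega)
    · rw [refFrom_stop s N j (by omega), refFrom_stop s N (N - 1) (by omega)]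

-- ===== VERDICT (by name: the statement is the Claim_ definition above) =====
theorem n_matching_spec : Claim_equal_n_matching := by
  intro n number _ hpre
  have hpre' : 1 ≤ n := hpre
  unfold Spec_n_matching n_matching n_matching_alt
  obtain ⟨N, hn⟩ : ∃ N : Nat, n = (N : Int) := ⟨n.toNat, by omega⟩
  have hN : 1 ≤ N := by omega
  have hA := A_loop_eq n N hn hN number.toList (number.toList.length + 1) 0 [] (by omega)
  have hB := B_loop_eq n N hn hN number.toList number.toList 0 0 [] (by simp) ⟨by omega, by omega, Or.inl rfl⟩
  simp only [Nat.cast_zero] at hA hB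
  rw [if_pos trivial] at hB
  rw [hA, hB, show 0 + N - 1 = N - 1 by omega, refFrom_low number.toList N (N - 1) 0 (by omega)]
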